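-- pv_equiv track=rewrite | github.com/dylanbstorey/media_processing | media_manager.py | is_english_language
-- ===== SOURCE A (Python) =====
-- def is_english_language(language):
--     if not language:
--         return False
--     language = language.lower()
--     english_indicators = [
--         'english', 'eng', 'en',  # Common names and abbreviations
--         'en-us', 'en-gb', 'en-au', 'en-ca',  # Country-specific variants
--         'eng-us', 'eng-gb', 'eng-au', 'eng-ca',
--         'en-uk', 'eng-uk',  # Additional UK variants
--         'en-nz', 'eng-nz',  # New Zealand
--         'en-ie', 'eng-ie',  # Ireland
--         'en-za', 'eng-za',  # South Africa
--         'en-in', 'eng-in',  # India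
--         'en-sg', 'eng-sg',  # Singapore
--         'eng dum', 'eng dub',  # Common misspellings or abbreviations
--         'english dub', 'english dubbed'
--     ]
--     return any(indicator in language or language.startswith(indicator) for indicator in english_indicators)
-- ===== SOURCE B (Python) =====
-- def is_english_language(language):
--     # Every indicator in A's list contains 'en' and 'en' is itself an indicator,
--     # so the whole scan collapses to one substring test.
--     if not language:
--         return False
--     return 'en' in language.lower()
-- ===== Notes on version B (the rewrite author's own statement) =====
-- stated objective: simpler
-- what changed: Replaced the scan over a 28-element indicator list (substring + redundant startswith per element) with a single 'en' substring test, exact because 'en' is an indicator and a substring of every other indicator.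
import Mathlib
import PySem

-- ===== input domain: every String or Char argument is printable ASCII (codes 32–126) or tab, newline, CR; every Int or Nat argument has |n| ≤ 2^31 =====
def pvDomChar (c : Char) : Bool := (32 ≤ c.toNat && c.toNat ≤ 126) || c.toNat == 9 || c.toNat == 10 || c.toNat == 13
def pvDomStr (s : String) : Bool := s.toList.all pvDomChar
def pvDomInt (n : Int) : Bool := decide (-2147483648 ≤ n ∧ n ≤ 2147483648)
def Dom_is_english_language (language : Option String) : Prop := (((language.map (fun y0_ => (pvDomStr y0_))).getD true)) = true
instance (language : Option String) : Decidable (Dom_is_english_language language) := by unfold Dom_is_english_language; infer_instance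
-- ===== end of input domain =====

-- B replaces A's scan over 28 indicator strings with one 'en' substring test (simpler; proved exact).


-- ===== PORT A =====
def englishIndicators : List String :=
  ["english", "eng", "en",
   "en-us", "en-gb", "en-au", "en-ca",
   "eng-us", "eng-gb", "eng-au", "eng-ca",
   "en-uk", "eng-uk",
   "en-nz", "eng-nz",
   "en-ie", "eng-ie",
   "en-za", "eng-za",
   "en-in", "eng-in",
   "en-sg", "eng-sg",
   "eng dum", "eng dub",
   "english dub", "english dubbed"]

def is_english_language (language : Option String) : Bool :=
  match language with
  | none => false
  | some s =>
    if s.toList = [] then false            -- 'if not language' (empty string is falsy)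
    else
      let l := PySem.Str.lower s
      englishIndicators.any fun indicator =>
        PySem.Str.isIn indicator l || PySem.Str.startswith l indicator

-- ===== PORT B =====
def is_english_language_alt (language : Option String) : Bool :=
  match language with
  | none => false
  | some s => !s.toList.isEmpty && PySem.Str.isIn "en" (PySem.Str.lower s)

-- ===== PRECONDITION & SPEC =====
def Spec_is_english_language (language : Option String) (out : Bool) : Prop := out = is_english_language_alt language
instance (language : Option String) (out : Bool) : Decidable (Spec_is_english_language language out) := by unfold Spec_is_english_language; infer_instance

-- ===== CLAIM (what is proved, stated in full; the proofs are below) =====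
def Claim_equal_is_english_language : Prop := ∀ (language : Option String), Dom_is_english_language language → Spec_is_english_language language (is_english_language language)

-- ===== LEMMAS AND PROOFS =====

-- Any single indicator test succeeding forces an 'en' occurrence, since ['e','n'] is an infix of every indicator.
theorem indicator_implies_en (ind l : List Char) (h : ['e', 'n'] <:+: ind)
    (hd : (PySem.Chars.isIn ind l || PySem.Chars.startswith l ind) = true) :
    PySem.Chars.isIn ['e', 'n'] l = true := by
  rw [PySem.Chars.isIn_iff_infix]
  rw [Bool.or_eq_true] at hd
  rcases hd with h1 | h1
  · exact h.trans ((PySem.Chars.isIn_iff_infix ind l).mp h1)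
  · exact h.trans ((PySem.Chars.startswith_iff l ind).mp h1).isInfix

theorem en_infix_all : ∀ ind ∈ englishIndicators, ['e', 'n'] <:+: ind.toList := by decide

-- The whole scan over the indicator list equals the single 'en' substring test.
theorem any_eq_en (l : List Char) :
    (englishIndicators.any fun indicator =>
        PySem.Chars.isIn indicator.toList l || PySem.Chars.startswith l indicator.toList)
      = PySem.Chars.isIn ['e', 'n'] l := by
  by_cases hen : PySem.Chars.isIn ['e', 'n'] l = true
  · rw [hen, List.any_eq_true]
    refine ⟨"en", by simp [englishIndicators], ?_⟩
    rw [Bool.or_eq_true]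
    exact Or.inl (by simpa using hen)
  · rw [Bool.not_eq_true] at hen
    rw [hen, List.any_eq_false]
    intro ind hmem
    rw [Bool.not_eq_true]
    by_contra hne
    rw [Bool.not_eq_false] at hne
    exact absurd (indicator_implies_en ind.toList l (en_infix_all ind hmem) hne)
      (by simp [hen])

-- ===== VERDICT (by name: the statement is the Claim_ definition above) =====
theorem is_english_language_spec : Claim_equal_is_english_language := by
  intro language _
  unfold Spec_is_english_language
  match language with
  | none => rfl
  | some s =>
    by_cases h : s.toList = []
    · simp [is_english_language, is_english_language_alt, h]
    · have hk := any_eq_en (PySem.Chars.lower s.toList)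
      simp only [is_english_language, is_english_language_alt, h,
        PySem.Str.isIn_eq, PySem.Str.startswith_eq, PySem.Str.toList_lower]
      have hne : s.toList.isEmpty = false := by simp [h]
      rw [hne]
      simpa using hk
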